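-- pv_equiv track=rewrite | github.com/dgwheeler/cephra-daily | build.py | render_governance_panel
-- ===== SOURCE A (Python) =====
-- def render_governance_panel(gov: dict) -> str:
--     """Render owner directives, manager validations, escalations."""
--     g = gov.get("governance", {})
--     directives = g.get("owner_directives", [])
--     validations = g.get("manager_validations", [])
--     escalations = g.get("escalations", [])
--     questions = g.get("ceo_forwarded_questions", [])
--
--     if not any([directives, validations, escalations, questions]):
--         return ""
--
--     items_html = ""
--     for d in directives:
--         items_html += f'<div class="governance-item directive"><div class="governance-item-label">Owner Directive</div>{d}</div>'
--     for v in validations: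
--         items_html += f'<div class="governance-item validation"><div class="governance-item-label">Manager Validation</div>{v}</div>'
--     for e in escalations:
--         items_html += f'<div class="governance-item escalation"><div class="governance-item-label">Escalation</div>{e}</div>'
--     for q in questions:
--         items_html += f'<div class="governance-item question"><div class="governance-item-label">CEO Question</div>{q}</div>'
--
--     return f"""
--     <div class="panel">
--         <div class="panel-header">Governance</div>
--         {items_html}
--     </div>"""
-- ===== SOURCE B (Python) =====
-- def render_governance_panel(gov: dict) -> str:
--     """Render owner directives, manager validations, escalations."""
--     g = gov.get("governance", {})
--
--     def render_items(cls, label, items):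
--         # recursive: render head, recurse on tail
--         if not items:
--             return ""
--         head = f'<div class="governance-item {cls}"><div class="governance-item-label">{label}</div>{items[0]}</div>'
--         return head + render_items(cls, label, items[1:])
--
--     items_html = (
--         render_items("directive", "Owner Directive", g.get("owner_directives", []))
--         + render_items("validation", "Manager Validation", g.get("manager_validations", []))
--         + render_items("escalation", "Escalation", g.get("escalations", []))
--         + render_items("question", "CEO Question", g.get("ceo_forwarded_questions", []))
--     )
--
--     # no separate any() pre-check: the panel is empty exactly when no item rendered
--     if not items_html:
--         return ""
--
--     return f"""
--     <div class="panel">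
--         <div class="panel-header">Governance</div>
--         {items_html}
--     </div>"""
-- ===== Notes on version B (the rewrite author's own statement) =====
-- stated objective: alternative
-- what changed: Replaces the four imperative accumulation loops and the up-front any() emptiness test by a recursive per-category renderer (head + recursion on the tail) and derives the empty-panel case from the rendered output itself: render first, return '' iff the items string came out empty.
import Mathlib
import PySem

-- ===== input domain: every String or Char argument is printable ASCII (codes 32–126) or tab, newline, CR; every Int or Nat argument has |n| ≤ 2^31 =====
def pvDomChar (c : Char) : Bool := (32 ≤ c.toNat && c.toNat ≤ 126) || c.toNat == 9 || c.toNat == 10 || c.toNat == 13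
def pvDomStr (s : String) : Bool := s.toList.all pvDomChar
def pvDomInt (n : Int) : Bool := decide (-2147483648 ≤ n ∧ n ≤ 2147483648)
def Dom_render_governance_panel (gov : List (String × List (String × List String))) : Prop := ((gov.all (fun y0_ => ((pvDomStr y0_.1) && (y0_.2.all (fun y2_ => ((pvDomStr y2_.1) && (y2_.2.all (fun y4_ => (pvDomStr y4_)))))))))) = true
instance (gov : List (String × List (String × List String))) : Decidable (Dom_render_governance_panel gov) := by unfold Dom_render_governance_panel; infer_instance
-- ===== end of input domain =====

-- B replaces A's four imperative accumulation loops and the up-front any() test by a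
-- recursive per-category renderer; the empty case is derived from the rendered output itself.

-- ===== PORT A =====
def render_governance_panel (gov : List (String × List (String × List String))) : String :=
  let g := (PySem.Dict.mk gov).getD "governance" []
  let directives := (PySem.Dict.mk g).getD "owner_directives" []
  let validations := (PySem.Dict.mk g).getD "manager_validations" []
  let escalations := (PySem.Dict.mk g).getD "escalations" []
  let questions := (PySem.Dict.mk g).getD "ceo_forwarded_questions" []
  if directives.isEmpty && validations.isEmpty && escalations.isEmpty && questions.isEmpty then
    ""
  else
    let items_html := ""
    let items_html := directives.foldl (fun acc d =>
      acc ++ ("<div class=\"governance-item directive\"><div class=\"governance-item-label\">Owner Directive</div>" ++ d ++ "</div>")) items_html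
    let items_html := validations.foldl (fun acc v =>
      acc ++ ("<div class=\"governance-item validation\"><div class=\"governance-item-label\">Manager Validation</div>" ++ v ++ "</div>")) items_html
    let items_html := escalations.foldl (fun acc e =>
      acc ++ ("<div class=\"governance-item escalation\"><div class=\"governance-item-label\">Escalation</div>" ++ e ++ "</div>")) items_html
    let items_html := questions.foldl (fun acc q =>
      acc ++ ("<div class=\"governance-item question\"><div class=\"governance-item-label\">CEO Question</div>" ++ q ++ "</div>")) items_html
    "\n    <div class=\"panel\">\n        <div class=\"panel-header\">Governance</div>\n        " ++ items_html ++ "\n    </div>"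

-- ===== PORT B =====
-- Source B's render_items: f-string head + recursion on items[1:] (on a nonempty list, [1:] is the tail — exact)
def pvRenderItems (cls label : String) : List String → String
  | [] => ""
  | d :: rest =>
      "<div class=\"governance-item " ++ cls ++ "\"><div class=\"governance-item-label\">" ++ label ++ "</div>" ++ d ++ "</div>"
        ++ pvRenderItems cls label rest

def render_governance_panel_alt (gov : List (String × List (String × List String))) : String :=
  let g := (PySem.Dict.mk gov).getD "governance" []
  let items_html :=
    pvRenderItems "directive" "Owner Directive" ((PySem.Dict.mk g).getD "owner_directives" [])
    ++ pvRenderItems "validation" "Manager Validation" ((PySem.Dict.mk g).getD "manager_validations" [])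
    ++ pvRenderItems "escalation" "Escalation" ((PySem.Dict.mk g).getD "escalations" [])
    ++ pvRenderItems "question" "CEO Question" ((PySem.Dict.mk g).getD "ceo_forwarded_questions" [])
  if items_html = "" then
    ""
  else
    "\n    <div class=\"panel\">\n        <div class=\"panel-header\">Governance</div>\n        " ++ items_html ++ "\n    </div>"

-- ===== PRECONDITION & SPEC =====
def Spec_render_governance_panel (gov : List (String × List (String × List String))) (out : String) : Prop := out = render_governance_panel_alt gov
instance (gov : List (String × List (String × List String))) (out : String) : Decidable (Spec_render_governance_panel gov out) := by unfold Spec_render_governance_panel; infer_instance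

-- ===== CLAIM (what is proved, stated in full; the proofs are below) =====
def Claim_equal_render_governance_panel : Prop := ∀ (gov : List (String × List (String × List String))), Dom_render_governance_panel gov → Spec_render_governance_panel gov (render_governance_panel gov)

-- ===== LEMMAS AND PROOFS =====
-- A's loop over one category equals B's recursive renderer, for any accumulator,
-- provided A's single prefix literal equals B's pieced-together prefix.
theorem pvRend_eq_foldl (cls label litA : String)
    (h : "<div class=\"governance-item " ++ cls ++ "\"><div class=\"governance-item-label\">" ++ label ++ "</div>" = litA)
    (l : List String) : ∀ init : String,
    l.foldl (fun acc d => acc ++ (litA ++ d ++ "</div>")) init = init ++ pvRenderItems cls label l := by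
  induction l with
  | nil => intro init; simp [pvRenderItems]
  | cons x xs ih =>
      intro init
      subst h
      simp only [List.foldl]
      rw [ih]
      simp [pvRenderItems, String.append_assoc]

theorem pvRend_ne_empty (cls label : String) (x : String) (xs : List String) :
    pvRenderItems cls label (x :: xs) ≠ "" := by
  simp only [pvRenderItems]
  intro h
  have hl := congrArg String.length h
  simp only [String.length_append] at hl
  have h28 : ("<div class=\"governance-item " : String).length = 28 := by decide
  have h0 : ("" : String).length = 0 := by decide
  rw [h28, h0] at hl
  omega

theorem pvRend_empty_iff (cls label : String) (l : List String) :
    pvRenderItems cls label l = "" ↔ l = [] := by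
  cases l with
  | nil => simp [pvRenderItems]
  | cons x xs =>
      constructor
      · intro h; exact absurd h (pvRend_ne_empty cls label x xs)
      · intro h; exact absurd h (List.cons_ne_nil x xs)

-- ===== VERDICT (by name: the statement is the Claim_ definition above) =====
theorem render_governance_panel_spec : Claim_equal_render_governance_panel := by
  intro gov _
  unfold Spec_render_governance_panel render_governance_panel render_governance_panel_alt
  have e1 := pvRend_eq_foldl "directive" "Owner Directive"
    "<div class=\"governance-item directive\"><div class=\"governance-item-label\">Owner Directive</div>" (by decide)
  have e2 := pvRend_eq_foldl "validation" "Manager Validation"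
    "<div class=\"governance-item validation\"><div class=\"governance-item-label\">Manager Validation</div>" (by decide)
  have e3 := pvRend_eq_foldl "escalation" "Escalation"
    "<div class=\"governance-item escalation\"><div class=\"governance-item-label\">Escalation</div>" (by decide)
  have e4 := pvRend_eq_foldl "question" "CEO Question"
    "<div class=\"governance-item question\"><div class=\"governance-item-label\">CEO Question</div>" (by decide)
  simp only [e1, e2, e3, e4, String.empty_append]
  set g := (PySem.Dict.mk gov).getD "governance" [] with hg
  set D := (PySem.Dict.mk g).getD "owner_directives" [] with hD
  set V := (PySem.Dict.mk g).getD "manager_validations" [] with hV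
  set E := (PySem.Dict.mk g).getD "escalations" [] with hE
  set Q := (PySem.Dict.mk g).getD "ceo_forwarded_questions" [] with hQ
  by_cases hall : D = [] ∧ V = [] ∧ E = [] ∧ Q = []
  · obtain ⟨h1, h2, h3, h4⟩ := hall
    simp [h1, h2, h3, h4, pvRenderItems]
  · have hcond : (D.isEmpty && V.isEmpty && E.isEmpty && Q.isEmpty) = false := by
      rcases Decidable.not_and_iff_not_or_not.mp hall with h | hrest
      · simp [List.isEmpty_eq_false_iff.mpr h]
      · rcases Decidable.not_and_iff_not_or_not.mp hrest with h | hrest2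
        · simp [List.isEmpty_eq_false_iff.mpr h]
        · rcases Decidable.not_and_iff_not_or_not.mp hrest2 with h | h
          · simp [List.isEmpty_eq_false_iff.mpr h]
          · simp [List.isEmpty_eq_false_iff.mpr h]
    rw [hcond]
    have hne : (pvRenderItems "directive" "Owner Directive" D ++ pvRenderItems "validation" "Manager Validation" V
        ++ pvRenderItems "escalation" "Escalation" E ++ pvRenderItems "question" "CEO Question" Q) ≠ "" := by
      intro h
      rw [String.append_eq_empty_iff, String.append_eq_empty_iff, String.append_eq_empty_iff] at h
      exact hall ⟨(pvRend_empty_iff _ _ _).1 h.1.1.1, (pvRend_empty_iff _ _ _).1 h.1.1.2,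
                  (pvRend_empty_iff _ _ _).1 h.1.2, (pvRend_empty_iff _ _ _).1 h.2⟩
    rw [if_neg hne]
    simp
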